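-- pv_equiv track=rewrite | github.com/momentum-sez/stack | tools/mmr.py | _find_peak_for_leaf
-- ===== SOURCE A (Python) =====
-- from typing import List, Tuple, Dict, Any
--
-- def _peak_plan(size: int) -> List[Tuple[int, int]]:
--     """Return a list of peaks as (height, leaf_count) from left-to-right for a given leaf size."""
--     if size < 0:
--         raise ValueError("size must be >= 0")
--     out: List[Tuple[int, int]] = []
--     n = size
--     while n > 0:
--         # highest power of two <= n
--         h = n.bit_length() - 1
--         cnt = 1 << h
--         out.append((h, cnt))
--         n -= cnt
--     return out
--
-- def _find_peak_for_leaf(size: int, leaf_index: int) -> Tuple[int, int, int]: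
--     """Return (peak_index, peak_start, peak_height) for leaf_index in an MMR of given size."""
--     if leaf_index < 0 or leaf_index >= size:
--         raise ValueError("leaf_index out of range")
--     start = 0
--     plan = _peak_plan(size)
--     for i, (h, cnt) in enumerate(plan):
--         if start <= leaf_index < start + cnt:
--             return (i, start, h)
--         start += cnt
--     raise RuntimeError("unable to locate peak")
-- ===== SOURCE B (Python) =====
-- def _find_peak_for_leaf(size: int, leaf_index: int):
--     """Return (peak_index, peak_start, peak_height) for leaf_index in an MMR of given size.
--
--     Closed form: the peaks of an MMR of `size` leaves are exactly the set bits of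
--     `size` taken from high to low.  The peak containing `leaf_index` sits at bit
--     position h = highest bit where `size` and `leaf_index` differ (that bit is set
--     in `size` and clear in `leaf_index` because leaf_index < size); its start is
--     `size` with bits <= h cleared, and its index is the number of set bits of
--     `size` above h.  No loop over the decomposition is needed.
--     """
--     if leaf_index < 0 or leaf_index >= size:
--         raise ValueError("leaf_index out of range")
--     h = (size ^ leaf_index).bit_length() - 1
--     hi = size >> (h + 1)
--     return (bin(hi).count("1"), hi << (h + 1), h)
-- ===== Notes on version B (the rewrite author's own statement) =====
-- stated objective: alternative
-- what changed: B eliminates A's decompose-then-scan search entirely: instead of building the peak plan and walking it accumulating starts, B computes the answer in closed form from bit arithmetic -- the peak height is the highest bit where size and leaf_index differ (h = (size ^ leaf_index).bit_length()-1), the peak start is size with bits <= h cleared, and the peak index is the popcount of size above bit h.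
import Mathlib
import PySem

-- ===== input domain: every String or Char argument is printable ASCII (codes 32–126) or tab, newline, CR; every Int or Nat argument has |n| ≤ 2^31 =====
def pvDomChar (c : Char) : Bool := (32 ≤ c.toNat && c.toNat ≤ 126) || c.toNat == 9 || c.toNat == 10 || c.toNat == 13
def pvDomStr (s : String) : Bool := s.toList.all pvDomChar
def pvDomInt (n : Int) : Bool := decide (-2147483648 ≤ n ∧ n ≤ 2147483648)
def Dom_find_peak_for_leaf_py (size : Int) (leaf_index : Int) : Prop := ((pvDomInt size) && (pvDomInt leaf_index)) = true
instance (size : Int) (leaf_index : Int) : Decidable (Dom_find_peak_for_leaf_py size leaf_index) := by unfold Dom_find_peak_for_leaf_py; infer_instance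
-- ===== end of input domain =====

-- B replaces A's decompose-and-scan search by a loop-free closed form: the containing
-- peak's height is the highest bit where size and leaf_index differ (objective: simpler).
-- A raises on out-of-range leaf_index; those inputs are excluded by Pre_.

-- ===== PORT A =====
-- _peak_plan: while n > 0: h = n.bit_length()-1; cnt = 1<<h; append (h,cnt); n -= cnt
-- n.bit_length()-1 for n > 0 is Nat.log2 n.toNat (exact on positive ints).
def pyPeakPlan (n : Int) : List (Int × Int) :=
  if _h0 : 0 < n then
    let h : Nat := Nat.log2 n.toNat
    let cnt : Int := (2 : Int) ^ h
    ((h : Int), cnt) :: pyPeakPlan (n - cnt)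
  else []
termination_by n.toNat
decreasing_by
  have h1 : (1 : Int) ≤ (2 : Int) ^ Nat.log2 n.toNat := one_le_pow₀ (by norm_num)
  omega

-- the 'for i, (h, cnt) in enumerate(plan)' scan with running start; none = the RuntimeError path
def pyFindScan (plan : List (Int × Int)) (start : Int) (i : Int) (leaf : Int) :
    Option (Int × Int × Int) :=
  match plan with
  | [] => none
  | (h, cnt) :: rest =>
    if start ≤ leaf ∧ leaf < start + cnt then some (i, start, h)
    else pyFindScan rest (start + cnt) (i + 1) leaf

def find_peak_for_leaf_py (size : Int) (leaf_index : Int) : Int × Int × Int :=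
  if leaf_index < 0 ∨ leaf_index ≥ size then (0, 0, 0)  -- ValueError, excluded by Pre_
  else (pyFindScan (pyPeakPlan size) 0 0 leaf_index).getD (0, 0, 0)  -- getD: RuntimeError path, unreachable under Pre_

-- ===== PORT B =====
-- bin(n).count("1") for n ≥ 0 (exact: B only applies it to a nonnegative int)
def popcountNat (n : Nat) : Nat :=
  if n = 0 then 0 else n % 2 + popcountNat (n / 2)
decreasing_by omega

-- closed form: h = (size ^ leaf_index).bit_length() - 1; under the guard both ints are
-- nonnegative and size ^ leaf_index > 0, so bit_length()-1 is Nat.log2 on toNat (exact).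
def find_peak_for_leaf_py_alt (size : Int) (leaf_index : Int) : Int × Int × Int :=
  if leaf_index < 0 ∨ leaf_index ≥ size then (0, 0, 0)  -- ValueError, excluded by Pre_
  else
    let h : Nat := Nat.log2 (size.toNat ^^^ leaf_index.toNat)
    let hi : Nat := size.toNat >>> (h + 1)
    ((popcountNat hi : Int), ((hi <<< (h + 1) : Nat) : Int), (h : Int))

-- ===== PRECONDITION & SPEC =====
-- Pre_ excludes exactly the inputs where A raises ValueError (leaf_index out of range).
def Pre_find_peak_for_leaf_py (size : Int) (leaf_index : Int) : Prop :=
  0 ≤ leaf_index ∧ leaf_index < size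
instance (size : Int) (leaf_index : Int) : Decidable (Pre_find_peak_for_leaf_py size leaf_index) := by
  unfold Pre_find_peak_for_leaf_py; infer_instance
def pvWitness_find_peak_for_leaf_py : Int × Int := (11, 9)

def Spec_find_peak_for_leaf_py (size : Int) (leaf_index : Int) (out : Int × Int × Int) : Prop :=
  out = find_peak_for_leaf_py_alt size leaf_index
instance (size : Int) (leaf_index : Int) (out : Int × Int × Int) :
    Decidable (Spec_find_peak_for_leaf_py size leaf_index out) := by
  unfold Spec_find_peak_for_leaf_py; infer_instance

-- ===== CLAIM (what is proved, stated in full; the proofs are below) =====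
def Claim_equal_find_peak_for_leaf_py : Prop := ∀ (size : Int) (leaf_index : Int), Dom_find_peak_for_leaf_py size leaf_index → Pre_find_peak_for_leaf_py size leaf_index → Spec_find_peak_for_leaf_py size leaf_index (find_peak_for_leaf_py size leaf_index)

-- ===== LEMMAS AND PROOFS =====

-- popcountNat one unfolding, valid also at 0
theorem popcount_step (n : Nat) : popcountNat n = n % 2 + popcountNat (n / 2) := by
  rw [popcountNat]
  split
  · subst ‹n = 0›; simp [popcountNat]
  · rfl

theorem popcount_two_pow_add (k q : Nat) (hq : q < 2 ^ k) :
    popcountNat (2 ^ k + q) = 1 + popcountNat q := by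
  induction k generalizing q with
  | zero =>
    interval_cases q
    simp [popcountNat]
  | succ k ih =>
    have h2 : 2 ^ (k + 1) = 2 * 2 ^ k := by ring
    rw [popcount_step (2 ^ (k + 1) + q)]
    have hmod : (2 ^ (k + 1) + q) % 2 = q % 2 := by omega
    have hdiv : (2 ^ (k + 1) + q) / 2 = 2 ^ k + q / 2 := by omega
    rw [hmod, hdiv, ih (q / 2) (by omega), popcount_step q]
    omega

-- bit H of 2^H + a (a < 2^H) is 1
theorem testBit_high (H a : Nat) (ha : a < 2 ^ H) : (2 ^ H + a).testBit H = true := by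
  rw [Nat.testBit_two_pow_add_eq, Nat.testBit_lt_two_pow ha]
  rfl

-- case 1: r below the top peak ⇒ the top differing bit is the top bit of n
theorem log2_xor_top (H n' r : Nat) (hn' : n' < 2 ^ H) (hr : r < 2 ^ H) :
    Nat.log2 ((2 ^ H + n') ^^^ r) = H := by
  set n := 2 ^ H + n' with hn
  have hbit : (n ^^^ r).testBit H = true := by
    rw [Nat.testBit_xor, testBit_high H n' hn', Nat.testBit_lt_two_pow hr]
    rfl
  have hge : 2 ^ H ≤ n ^^^ r := Nat.ge_two_pow_of_testBit hbit
  have hlt : n ^^^ r < 2 ^ (H + 1) := by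
    have h1 : n < 2 ^ (H + 1) := by
      have : 2 ^ (H + 1) = 2 ^ H + 2 ^ H := by ring
      omega
    exact Nat.xor_lt_two_pow h1 (by have : (2:Nat) ^ H ≤ 2 ^ (H+1) := Nat.pow_le_pow_right (by norm_num) (by omega); omega)
  have hne : n ^^^ r ≠ 0 := by
    have := Nat.two_pow_pos H
    omega
  have h1 := (Nat.log2_lt hne).mpr hlt
  have h2 : ¬ Nat.log2 (n ^^^ r) < H := fun hc => by
    have := (Nat.log2_lt hne).mp hc
    omega
  omega

-- case 2: both in/after the top peak ⇒ the top bits cancel in the xor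
theorem xor_drop_top (H a b : Nat) (ha : a < 2 ^ H) (hb : b < 2 ^ H) :
    (2 ^ H + a) ^^^ (2 ^ H + b) = a ^^^ b := by
  apply Nat.eq_of_testBit_eq
  intro j
  have e1 : (2 ^ H + a) = 2 ^ H * 1 + a := by ring_nf
  have e2 : (2 ^ H + b) = 2 ^ H * 1 + b := by ring_nf
  rw [Nat.testBit_xor, Nat.testBit_xor, e1, e2,
      Nat.testBit_two_pow_mul_add 1 ha j, Nat.testBit_two_pow_mul_add 1 hb j]
  by_cases hj : j < H
  · simp [hj]
  · have haj : a.testBit j = false :=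
      Nat.testBit_lt_two_pow (lt_of_lt_of_le ha (Nat.pow_le_pow_right (by norm_num) (by omega)))
    have hbj : b.testBit j = false :=
      Nat.testBit_lt_two_pow (lt_of_lt_of_le hb (Nat.pow_le_pow_right (by norm_num) (by omega)))
    simp [hj, haj, hbj]

-- splitting the high bit across a right shift by k ≤ H
theorem shiftRight_top (H n' k : Nat) (_hn' : n' < 2 ^ H) (hk : k ≤ H) :
    (2 ^ H + n') >>> k = 2 ^ (H - k) + n' >>> k := by
  have hsplit : 2 ^ H = 2 ^ k * 2 ^ (H - k) := by
    rw [← pow_add]; congr 1; omega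
  rw [Nat.shiftRight_eq_div_pow, Nat.shiftRight_eq_div_pow, hsplit]
  exact Nat.mul_add_div (Nat.two_pow_pos k) _ _

theorem shiftLeft_top (H q k : Nat) (hk : k ≤ H) :
    (2 ^ (H - k) + q) <<< k = 2 ^ H + q <<< k := by
  have hsplit : 2 ^ H = 2 ^ (H - k) * 2 ^ k := by
    rw [← pow_add]; congr 1; omega
  rw [Nat.shiftLeft_eq, Nat.shiftLeft_eq, Nat.add_mul, hsplit]

-- the main bridge: A's scan of the materialized plan returns B's closed form
theorem scan_closed (N : Nat) : ∀ (n r : Nat) (start i : Int), n ≤ N → r < n →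
    pyFindScan (pyPeakPlan (n : Int)) start i (start + (r : Int)) =
      some (i + (popcountNat (n >>> (Nat.log2 (n ^^^ r) + 1)) : Int),
            start + (((n >>> (Nat.log2 (n ^^^ r) + 1)) <<< (Nat.log2 (n ^^^ r) + 1) : Nat) : Int),
            (Nat.log2 (n ^^^ r) : Int)) := by
  induction N with
  | zero => intro n r start i hN hr; omega
  | succ N ih =>
    intro n r start i hN hr
    have hnn : 0 < n := by omega
    have hn : (0 : Int) < (n : Int) := by exact_mod_cast hnn
    rw [pyPeakPlan]
    simp only [hn, dif_pos]
    have htn : ((n : Int)).toNat = n := Int.toNat_natCast n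
    rw [htn]
    set H := Nat.log2 n with hH
    have hle : 2 ^ H ≤ n := Nat.log2_self_le (by omega)
    have hlt2 : n < 2 ^ (H + 1) := Nat.lt_log2_self
    have hpow : ((2 : Int) ^ H) = ((2 ^ H : Nat) : Int) := by push_cast; ring
    set n' := n - 2 ^ H with hn'
    have hnsum : n = 2 ^ H + n' := by omega
    have hn'lt : n' < 2 ^ H := by
      have : 2 ^ (H + 1) = 2 ^ H + 2 ^ H := by ring
      omega
    by_cases hc : r < 2 ^ H
    · -- leaf in the top peak: scan returns immediately, closed form collapses
      have hcond : start ≤ start + (r : Int) ∧ start + (r : Int) < start + (2 : Int) ^ H := by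
        constructor
        · have : (0 : Int) ≤ (r : Int) := Int.natCast_nonneg r
          omega
        · have : (r : Int) < ((2 ^ H : Nat) : Int) := by exact_mod_cast hc
          rw [hpow]; omega
      rw [pyFindScan]
      simp only [hcond]
      have hx : Nat.log2 (n ^^^ r) = H := by
        rw [hnsum]; exact log2_xor_top H n' r hn'lt hc
      rw [hx]
      have hz : n >>> (H + 1) = 0 := by
        rw [Nat.shiftRight_eq_div_pow]
        exact Nat.div_eq_of_lt hlt2
      rw [hz]
      simp [popcountNat]
    · -- leaf after the top peak: recurse and shift the closed form by the top bit
      have hcond : ¬ (start ≤ start + (r : Int) ∧ start + (r : Int) < start + (2 : Int) ^ H) := by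
        intro ⟨_, h2⟩
        rw [hpow] at h2
        have : (r : Int) < ((2 ^ H : Nat) : Int) := by omega
        exact hc (by exact_mod_cast this)
      rw [pyFindScan]
      simp only [hcond, if_neg, not_false_iff]
      set r' := r - 2 ^ H with hr'
      have hrsum : r = 2 ^ H + r' := by omega
      have hr'n' : r' < n' := by omega
      have hcast : (n : Int) - (2 : Int) ^ H = ((n' : Int)) := by
        rw [hpow, hnsum]; push_cast; ring
      have hleaf : start + (r : Int) = (start + (2 : Int) ^ H) + (r' : Int) := by
        rw [hpow, hrsum]; push_cast; ring
      rw [hcast, hleaf, ih n' r' (start + (2 : Int) ^ H) (i + 1) (by omega) hr'n']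
      -- now rewrite the closed form of (n', r') into that of (n, r)
      set h' := Nat.log2 (n' ^^^ r') with hh'
      have hxeq : n ^^^ r = n' ^^^ r' := by
        rw [hnsum, hrsum]; exact xor_drop_top H n' r' hn'lt (by omega)
      have hxne : n' ^^^ r' ≠ 0 := by
        intro h0
        exact absurd (Nat.xor_eq_zero_iff.mp h0) (by omega)
      have hxlt : n' ^^^ r' < 2 ^ H := Nat.xor_lt_two_pow hn'lt (by omega)
      have hh'H : h' + 1 ≤ H := (Nat.log2_lt hxne).mpr hxlt
      have hsr : n >>> (h' + 1) = 2 ^ (H - (h' + 1)) + n' >>> (h' + 1) := by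
        rw [hnsum]; exact shiftRight_top H n' (h' + 1) hn'lt hh'H
      have hqlt : n' >>> (h' + 1) < 2 ^ (H - (h' + 1)) := by
        rw [Nat.shiftRight_eq_div_pow]
        have hsplit : 2 ^ (h' + 1) * 2 ^ (H - (h' + 1)) = 2 ^ H := by
          rw [← pow_add]; congr 1; omega
        exact Nat.div_lt_of_lt_mul (by omega)
      have hpc : popcountNat (n >>> (h' + 1)) = 1 + popcountNat (n' >>> (h' + 1)) := by
        rw [hsr]; exact popcount_two_pow_add _ _ hqlt
      have hsl : (n >>> (h' + 1)) <<< (h' + 1) = 2 ^ H + (n' >>> (h' + 1)) <<< (h' + 1) := by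
        rw [hsr]; exact shiftLeft_top H _ (h' + 1) hh'H
      rw [hxeq, hpc, hsl]
      simp only [Option.some.injEq, Prod.mk.injEq]
      refine ⟨by push_cast; ring, by rw [hpow]; push_cast; ring, rfl⟩

-- ===== VERDICT (by name: the statement is the Claim_ definition above) =====
theorem find_peak_for_leaf_py_spec : Claim_equal_find_peak_for_leaf_py := by
  intro size leaf_index _ hpre
  obtain ⟨h0, h1⟩ := hpre
  unfold Spec_find_peak_for_leaf_py find_peak_for_leaf_py find_peak_for_leaf_py_alt
  have hguard : ¬ (leaf_index < 0 ∨ leaf_index ≥ size) := by omega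
  simp only [hguard, if_neg, not_false_iff]
  have hsz : size = ((size.toNat : Nat) : Int) := by omega
  have hlf : leaf_index = (0 : Int) + ((leaf_index.toNat : Nat) : Int) := by omega
  have hrn : leaf_index.toNat < size.toNat := by omega
  conv_lhs => rw [hsz, hlf]
  rw [scan_closed size.toNat size.toNat leaf_index.toNat 0 0 (le_refl _) hrn]
  simp
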